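-- pv_equiv track=rewrite | github.com/gkepka/island-model | main_remote.py | get_l1_diversity
-- ===== SOURCE A (Python) =====
-- def get_l1_diversity(population):
--     def get_sum_of_differences(index):
--         arr = sorted(map(lambda x: x[index], population))
--         total = 0
--         arrSum = 0
--         for i in range(len(arr)):
--             total += (arr[i] * i - arrSum)
--             arrSum += arr[i]
--         return total
--
--     diversity = 0
--     ind_size = len(population[0])
--     for i in range(ind_size):
--         diversity += get_sum_of_differences(i)
--     return diversity
-- ===== SOURCE B (Python) =====
-- def get_l1_diversity(population):
--     ind_size = len(population[0])
--     total = 0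
--     rest = population
--     while rest:
--         row, rest = rest[0], rest[1:]
--         for other in rest:
--             for d in range(ind_size):
--                 total += abs(row[d] - other[d])
--     return total
-- ===== Notes on version B (the rewrite author's own statement) =====
-- stated objective: simpler
-- what changed: Replaced the per-dimension sort with running prefix-sum trick by the direct pairwise definition: peel rows off the list one at a time and add abs differences against every later row across all dimensions.
import Mathlib
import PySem

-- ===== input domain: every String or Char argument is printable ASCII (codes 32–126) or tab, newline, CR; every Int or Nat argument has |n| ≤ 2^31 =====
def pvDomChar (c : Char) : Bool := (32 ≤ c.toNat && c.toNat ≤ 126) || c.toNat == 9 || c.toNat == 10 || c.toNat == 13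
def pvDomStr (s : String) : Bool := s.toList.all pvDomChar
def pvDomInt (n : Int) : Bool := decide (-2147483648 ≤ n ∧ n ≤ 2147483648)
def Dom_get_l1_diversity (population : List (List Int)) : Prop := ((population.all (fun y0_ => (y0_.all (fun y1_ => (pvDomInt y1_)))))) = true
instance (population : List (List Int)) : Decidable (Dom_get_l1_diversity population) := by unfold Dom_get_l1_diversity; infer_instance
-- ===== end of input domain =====

-- B replaces the per-dimension sort + running-prefix-sum trick by the direct pairwise
-- definition (each row against every later row); objective: simpler.

-- ===== PORT A =====
def get_l1_diversity (population : List (List Int)) : Int :=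
  let ind_size : Int := (PySem.List.pyGetD population 0 []).length
  (PySem.List.pyRange 0 ind_size 1).foldl
    (fun diversity index =>
      let arr := PySem.List.sorted (population.map (fun x => PySem.List.pyGetD x index 0)) (fun y => y) false
      let p := (PySem.List.pyRange 0 (arr.length : Int) 1).foldl
        (fun p i => (p.1 + (PySem.List.pyGetD arr i 0 * i - p.2), p.2 + PySem.List.pyGetD arr i 0))
        ((0 : Int), (0 : Int))
      diversity + p.1) 0

-- ===== PORT B =====
def pvPairLoop (ind_size : Int) : List (List Int) → Int → Int
  | [], total => total
  | row :: rest, total =>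
    pvPairLoop ind_size rest
      (rest.foldl (fun t other =>
        (PySem.List.pyRange 0 ind_size 1).foldl
          (fun t d => t + |PySem.List.pyGetD row d 0 - PySem.List.pyGetD other d 0|) t) total)

def get_l1_diversity_alt (population : List (List Int)) : Int :=
  pvPairLoop ((PySem.List.pyGetD population 0 []).length : Int) population 0

-- ===== PRECONDITION & SPEC =====
-- Pre_ excludes exactly the inputs on which Python A raises IndexError: the empty
-- population (population[0]) and populations where some row is shorter than the first row
-- (x[index] inside the map).
def Pre_get_l1_diversity (population : List (List Int)) : Prop :=
  population ≠ [] ∧ ∀ row ∈ population, (population.headD []).length ≤ row.length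
instance (population : List (List Int)) : Decidable (Pre_get_l1_diversity population) := by
  unfold Pre_get_l1_diversity; infer_instance
def pvWitness_get_l1_diversity : List (List Int) := [[1, 2], [3, 4], [0, 7]]

def Spec_get_l1_diversity (population : List (List Int)) (out : Int) : Prop := out = get_l1_diversity_alt population
instance (population : List (List Int)) (out : Int) : Decidable (Spec_get_l1_diversity population out) := by unfold Spec_get_l1_diversity; infer_instance

-- ===== CLAIM (what is proved, stated in full; the proofs are below) =====
def Claim_equal_get_l1_diversity : Prop := ∀ (population : List (List Int)), Dom_get_l1_diversity population → Pre_get_l1_diversity population → Spec_get_l1_diversity population (get_l1_diversity population)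

-- ===== LEMMAS AND PROOFS =====

-- sum over ordered index pairs i < j of (l[j] - l[i])
def pvDirSum : List Int → Int
  | [] => 0
  | a :: l => (l.map (fun b => b - a)).sum + pvDirSum l

-- sum over unordered pairs of |difference|
def pvAbsSum : List Int → Int
  | [] => 0
  | a :: l => (l.map (fun b => |a - b|)).sum + pvAbsSum l

-- per-pair L1 distance over the first n coordinates, summed over all later-row pairs
def pvPairAbs (n : Int) : List (List Int) → Int
  | [] => 0
  | row :: rest =>
    (rest.map (fun o => ((PySem.List.pyRange 0 n 1).map
      (fun d => |PySem.List.pyGetD row d 0 - PySem.List.pyGetD o d 0|)).sum)).sum + pvPairAbs n rest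

theorem pvDirSum_append_singleton (l : List Int) (a : Int) :
    pvDirSum (l ++ [a]) = pvDirSum l + (l.map (fun b => a - b)).sum := by
  induction l with
  | nil => simp [pvDirSum]
  | cons x t ih => simp [pvDirSum, ih]; ring

theorem pvMapSub_sum (l : List Int) (a : Int) :
    (l.map (fun b => a - b)).sum = a * l.length - l.sum := by
  induction l with
  | nil => simp
  | cons x t ih => simp [ih]; ring

-- A's inner loop computes (pvDirSum arr, arr.sum)
theorem pvLoopA_eq (arr : List Int) :
    (PySem.List.pyRange 0 (arr.length : Int) 1).foldl
      (fun p i => (p.1 + (PySem.List.pyGetD arr i 0 * i - p.2), p.2 + PySem.List.pyGetD arr i 0))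
      ((0 : Int), (0 : Int)) = (pvDirSum arr, arr.sum) := by
  induction arr using List.reverseRecOn with
  | nil => simp [pvDirSum]
  | append_singleton l a ih =>
    have hlen : ((l ++ [a]).length : Int) = (l.length : Int) + 1 := by simp
    rw [hlen, PySem.List.pyRange_one_succ_right (by positivity), List.foldl_append]
    have hcongr : (PySem.List.pyRange 0 (l.length : Int) 1).foldl
        (fun p i => (p.1 + (PySem.List.pyGetD (l ++ [a]) i 0 * i - p.2), p.2 + PySem.List.pyGetD (l ++ [a]) i 0))
        ((0 : Int), (0 : Int)) = (pvDirSum l, l.sum) := by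
      rw [PySem.List.foldl_congr_mem (g := fun p i =>
          (p.1 + (PySem.List.pyGetD l i 0 * i - p.2), p.2 + PySem.List.pyGetD l i 0))]
      · exact ih
      · intro acc x hx
        have hx' := (PySem.List.mem_pyRange_one.mp hx)
        have h1 : PySem.List.pyGetD (l ++ [a]) x 0 = PySem.List.pyGetD l x 0 := by
          rw [PySem.List.pyGetD_eq_getElem (l ++ [a]) 0 hx'.1 (by simp; omega),
              PySem.List.pyGetD_eq_getElem l 0 hx'.1 (by exact_mod_cast hx'.2)]
          rw [List.getElem_append_left (by omega)]
        rw [h1]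
    rw [hcongr]
    simp only [List.foldl_cons, List.foldl_nil]
    have hget : PySem.List.pyGetD (l ++ [a]) (l.length : Int) 0 = a := by
      rw [PySem.List.pyGetD_eq_getElem (l ++ [a]) 0 (by positivity) (by simp)]
      simp
    rw [hget, pvDirSum_append_singleton, pvMapSub_sum]
    simp

theorem pvDirSum_eq_absSum_of_sorted (l : List Int) (h : l.Pairwise (· ≤ ·)) :
    pvDirSum l = pvAbsSum l := by
  induction l with
  | nil => rfl
  | cons a t ih =>
    have h1 := (List.pairwise_cons.mp h).1
    have h2 := (List.pairwise_cons.mp h).2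
    simp only [pvDirSum, pvAbsSum, ih h2]
    congr 1
    apply congrArg
    apply List.map_congr_left
    intro b hb
    have := h1 b hb
    rw [abs_of_nonpos (by omega)]
    ring

theorem pvAbsSum_perm {l l' : List Int} (h : l.Perm l') : pvAbsSum l = pvAbsSum l' := by
  induction h with
  | nil => rfl
  | cons a hp ih => simp only [pvAbsSum, ih, ((hp.map _).sum_eq : _)]
  | swap x y l =>
    simp only [pvAbsSum, List.map_cons, List.sum_cons]
    have : |y - x| = |x - y| := abs_sub_comm y x
    omega
  | trans _ _ ih1 ih2 => exact ih1.trans ih2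

-- sum interchange for list-indexed double sums
theorem pvSumSwap {α : Type} (D : List Int) (R : List α) (f : Int → α → Int) :
    (D.map (fun d => (R.map (f d)).sum)).sum = (R.map (fun o => (D.map (fun d => f d o)).sum)).sum := by
  induction D with
  | nil => simp
  | cons d D ih =>
    simp only [List.map_cons, List.sum_cons, ih]
    rw [← PySem.List.sum_map_add_int]

-- B's loop in closed form
theorem pvPairLoop_eq (n : Int) (l : List (List Int)) (total : Int) :
    pvPairLoop n l total = total + pvPairAbs n l := by
  induction l generalizing total with
  | nil => simp [pvPairLoop, pvPairAbs]
  | cons row rest ih =>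
    rw [pvPairLoop, ih]
    have hinner : rest.foldl (fun t other =>
        (PySem.List.pyRange 0 n 1).foldl
          (fun t d => t + |PySem.List.pyGetD row d 0 - PySem.List.pyGetD other d 0|) t) total
      = total + (rest.map (fun o => ((PySem.List.pyRange 0 n 1).map
          (fun d => |PySem.List.pyGetD row d 0 - PySem.List.pyGetD o d 0|)).sum)).sum := by
      rw [PySem.List.foldl_congr_mem (g := fun t other => t + ((PySem.List.pyRange 0 n 1).map
          (fun d => |PySem.List.pyGetD row d 0 - PySem.List.pyGetD other d 0|)).sum)]
      · rw [PySem.List.foldl_add]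
      · intro acc x _
        rw [PySem.List.foldl_add]
    rw [hinner, pvPairAbs]
    ring

-- the column-wise pair sums aggregate to the pairwise-row sums
theorem pvColumns_eq_pairs (n : Int) (pop : List (List Int)) :
    ((PySem.List.pyRange 0 n 1).map
      (fun d => pvAbsSum (pop.map (fun r => PySem.List.pyGetD r d 0)))).sum = pvPairAbs n pop := by
  induction pop with
  | nil => simp [pvAbsSum, pvPairAbs]
  | cons row rest ih =>
    simp only [List.map_cons, pvAbsSum, pvPairAbs, List.map_map, Function.comp_def]
    rw [PySem.List.sum_map_add_int, ih,
        pvSumSwap (PySem.List.pyRange 0 n 1) rest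
          (fun d o => |PySem.List.pyGetD row d 0 - PySem.List.pyGetD o d 0|)]

-- ===== VERDICT (by name: the statement is the Claim_ definition above) =====
theorem get_l1_diversity_spec : Claim_equal_get_l1_diversity := by
  intro population _ _
  unfold Spec_get_l1_diversity get_l1_diversity get_l1_diversity_alt
  rw [pvPairLoop_eq]
  simp only []
  rw [PySem.List.foldl_congr_mem (g := fun diversity index =>
      diversity + pvAbsSum (population.map (fun x => PySem.List.pyGetD x index 0)))]
  · rw [PySem.List.foldl_add]
    rw [pvColumns_eq_pairs]
  · intro acc x _
    rw [pvLoopA_eq]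
    congr 1
    rw [pvDirSum_eq_absSum_of_sorted _ (by
      have := PySem.List.sorted_pairwise (population.map (fun r => PySem.List.pyGetD r x 0)) (fun y => y)
      exact this)]
    exact pvAbsSum_perm (PySem.List.sorted_perm _ _ _)
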